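-- pv_equiv track=rewrite | github.com/Chemokoren/Algorithms-1 | GFG/Arrays/OptimizationProblems/longest_span_sum_two_binary_arrays.py | longestCommonSum
-- ===== SOURCE A (Python) =====
-- def longestCommonSum(arr1, arr2):
--
--     n = len(arr1)
--
--     # Initialize result
--     maxLen = 0
--
--     # One by one pick all possible starting points of subarrays
--     for i in range(0, n):
--
--         # Initialize sums of current subarrays
--         sum1 = 0
--         sum2 = 0
--
--         # Consider all points for starting with arr[i]
--         for j in range(i,n):
--
--             # update sums
--             sum1 += arr1[j]
--             sum2 += arr2[j]
--
--             # if sums are same and current length is more than maxLen, update maxLen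
--             if(sum1 == sum2):
--                 len_val = j-i+1
--                 if( len_val > maxLen):
--                     maxLen = len_val
--
--     return maxLen
-- ===== SOURCE B (Python) =====
-- def longestCommonSum(arr1, arr2):
--     # Single pass: longest span with equal sums = longest span whose
--     # prefix-difference repeats; remember first index of each difference.
--     first = {0: -1}
--     diff = 0
--     maxLen = 0
--     for j in range(len(arr1)):
--         diff += arr1[j] - arr2[j]
--         if diff in first:
--             cur = j - first[diff]
--             if cur > maxLen:
--                 maxLen = cur
--         else:
--             first[diff] = j
--     return maxLen
-- ===== Notes on version B (the rewrite author's own statement) =====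
-- stated objective: faster
-- what changed: Replaced the O(n^2) scan over all subarray start/end pairs by a single pass that tracks the running prefix-sum difference arr1-arr2 and a hashmap of the first index at which each difference value occurred.
import Mathlib
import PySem

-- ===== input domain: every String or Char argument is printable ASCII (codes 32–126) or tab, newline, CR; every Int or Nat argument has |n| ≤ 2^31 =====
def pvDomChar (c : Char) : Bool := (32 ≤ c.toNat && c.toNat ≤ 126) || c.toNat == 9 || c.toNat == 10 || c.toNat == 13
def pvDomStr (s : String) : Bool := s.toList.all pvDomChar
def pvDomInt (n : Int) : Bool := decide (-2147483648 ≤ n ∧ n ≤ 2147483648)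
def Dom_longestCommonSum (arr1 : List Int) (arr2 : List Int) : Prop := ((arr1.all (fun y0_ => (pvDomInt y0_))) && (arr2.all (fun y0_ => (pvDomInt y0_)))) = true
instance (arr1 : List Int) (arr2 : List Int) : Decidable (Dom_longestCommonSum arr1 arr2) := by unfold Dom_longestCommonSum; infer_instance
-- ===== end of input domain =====

-- B replaces A's O(n^2) two-nested-loop scan by one pass over the prefix-sum
-- difference with a first-occurrence dictionary (objective: faster).

-- ===== PORT A =====
-- inner-loop body of A: update sum1, sum2 and maxLen for index j
def pvAstep (arr1 arr2 : List Int) (i : Int) (s : Int × Int × Int) (j : Int) : Int × Int × Int :=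
  let sum1 := s.1 + PySem.List.pyGetD arr1 j 0
  let sum2 := s.2.1 + PySem.List.pyGetD arr2 j 0
  if sum1 == sum2 then
    let len_val := j - i + 1
    if len_val > s.2.2 then (sum1, sum2, len_val) else (sum1, sum2, s.2.2)
  else (sum1, sum2, s.2.2)

def longestCommonSum (arr1 : List Int) (arr2 : List Int) : Int :=
  let n : Int := PySem.List.len arr1
  (PySem.List.pyRange 0 n 1).foldl
    (fun maxLen i =>
      ((PySem.List.pyRange i n 1).foldl (pvAstep arr1 arr2 i) (0, 0, maxLen)).2.2)
    0

-- ===== PORT B =====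
-- loop body of B: extend the prefix difference, look it up / record first index
def pvBstep (arr1 arr2 : List Int) (s : PySem.Dict Int Int × Int × Int) (j : Int) :
    PySem.Dict Int Int × Int × Int :=
  let diff := s.2.1 + PySem.List.pyGetD arr1 j 0 - PySem.List.pyGetD arr2 j 0
  match s.1.get? diff with
  | some a =>
      let cur := j - a
      (s.1, diff, if cur > s.2.2 then cur else s.2.2)
  | none => (s.1.insert diff j, diff, s.2.2)

def longestCommonSum_alt (arr1 : List Int) (arr2 : List Int) : Int :=
  ((PySem.List.pyRange 0 (PySem.List.len arr1) 1).foldl (pvBstep arr1 arr2)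
    ((PySem.Dict.empty).insert 0 (-1), 0, 0)).2.2

-- ===== PRECONDITION & SPEC =====
-- Pre_ excludes exactly the inputs where A raises IndexError: len(arr1) > len(arr2)
-- makes A's inner loop read arr2[j] past the end of arr2 (B reads the same cell).
def Pre_longestCommonSum (arr1 : List Int) (arr2 : List Int) : Prop :=
  arr1.length ≤ arr2.length
instance (arr1 : List Int) (arr2 : List Int) : Decidable (Pre_longestCommonSum arr1 arr2) := by
  unfold Pre_longestCommonSum; infer_instance

def pvWitness_longestCommonSum : List Int × List Int := ([1, 0, 1], [0, 1, 1])

def Spec_longestCommonSum (arr1 : List Int) (arr2 : List Int) (out : Int) : Prop := out = longestCommonSum_alt arr1 arr2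
instance (arr1 : List Int) (arr2 : List Int) (out : Int) : Decidable (Spec_longestCommonSum arr1 arr2 out) := by unfold Spec_longestCommonSum; infer_instance

-- ===== CLAIM (what is proved, stated in full; the proofs are below) =====
def Claim_equal_longestCommonSum : Prop := ∀ (arr1 : List Int) (arr2 : List Int), Dom_longestCommonSum arr1 arr2 → Pre_longestCommonSum arr1 arr2 → Spec_longestCommonSum arr1 arr2 (longestCommonSum arr1 arr2)

-- ===== LEMMAS AND PROOFS =====

-- the elementwise difference list and its prefix sums
def pvD (arr1 arr2 : List Int) : List Int := List.zipWith (fun a b => a - b) arr1 arr2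
def pvP (d : List Int) (k : Nat) : Int := (d.take k).sum
-- first index ≤ t whose prefix sum is v
def pvF (d : List Int) (t : Nat) (v : Int) : Option Nat :=
  (List.range (t+1)).find? (fun k => pvP d k == v)
-- candidate span lengths produced by A (all qualifying pairs)
def pvLA (d : List Int) (n : Nat) : List Int :=
  (List.range n).flatMap (fun i =>
    ((List.range' i (n-i)).filter (fun j => pvP d (j+1) == pvP d i)).map
      (fun j : Nat => ((j:Int) - (i:Int) + 1)))
-- candidate span lengths produced by B (first-occurrence pairs only)
def pvCand (d : List Int) (j : Nat) : List Int :=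
  match pvF d j (pvP d (j+1)) with
  | some a => [(j:Int) + 1 - (a:Int)]
  | none => []


-- max-fold utilities
theorem pvMaxfold_le (L : List Int) (a c : Int) (ha : a ≤ c) (h : ∀ x ∈ L, x ≤ c) :
    L.foldl max a ≤ c := by
  rcases PySem.List.foldl_max_mem L a with h1 | h1
  · rw [h1]; exact ha
  · exact h _ h1

theorem pvMaxfold_eq (L1 L2 : List Int)
    (h1 : ∀ x ∈ L1, ∃ y ∈ L2, x ≤ y) (h2 : ∀ x ∈ L2, ∃ y ∈ L1, x ≤ y) :
    L1.foldl max 0 = L2.foldl max 0 := by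
  apply le_antisymm
  · refine pvMaxfold_le _ _ _ (PySem.List.le_foldl_max L2 0).1 (fun x hx => ?_)
    obtain ⟨y, hy, hxy⟩ := h1 x hx
    exact hxy.trans ((PySem.List.le_foldl_max L2 0).2 y hy)
  · refine pvMaxfold_le _ _ _ (PySem.List.le_foldl_max L1 0).1 (fun x hx => ?_)
    obtain ⟨y, hy, hxy⟩ := h2 x hx
    exact hxy.trans ((PySem.List.le_foldl_max L1 0).2 y hy)

theorem pvD_length (xs ys : List Int) (h : xs.length ≤ ys.length) :
    (pvD xs ys).length = xs.length := by
  simp [pvD]; omega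

theorem pvP_succ (d : List Int) (t : Nat) (h : t < d.length) :
    pvP d (t+1) = pvP d t + d[t] := by
  unfold pvP
  rw [List.take_add_one, List.getElem?_eq_getElem h, List.sum_append]
  simp

theorem pvP_zero (d : List Int) : pvP d 0 = 0 := rfl

theorem pvP_step (xs ys : List Int) (hlen : xs.length ≤ ys.length) (t : Nat)
    (ht : t < xs.length) :
    pvP (pvD xs ys) (t+1) = pvP (pvD xs ys) t +
      (xs[t]'ht - ys[t]'(lt_of_lt_of_le ht hlen)) := by
  have hd : t < (pvD xs ys).length := by rw [pvD_length xs ys hlen]; exact ht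
  rw [pvP_succ _ _ hd]
  congr 1
  simp [pvD, List.getElem_zipWith]

-- A's inner loop computes the running max over its qualifying spans
theorem pvInnerA (xs ys : List Int) (hlen : xs.length ≤ ys.length) (i : Nat) :
    ∀ (k t : Nat), xs.length - t = k → i ≤ t → t ≤ xs.length → ∀ (s1 s2 m : Int),
      s1 - s2 = pvP (pvD xs ys) t - pvP (pvD xs ys) i →
      ((PySem.List.pyRange (t:Int) (xs.length:Int) 1).foldl (pvAstep xs ys (i:Int)) (s1, s2, m)).2.2
        = List.foldl max m
            (((List.range' t k).filter
                (fun j => pvP (pvD xs ys) (j+1) == pvP (pvD xs ys) i)).map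
              (fun j : Nat => ((j:Int) - (i:Int) + 1))) := by
  intro k
  induction k with
  | zero =>
    intro t hk hti htn s1 s2 m hs
    have ht : t = xs.length := by omega
    subst ht
    rw [PySem.List.pyRange_one_eq_nil (le_refl _)]
    simp
  | succ k ih =>
    intro t hk hti htn s1 s2 m hs
    have htlt : t < xs.length := by omega
    have htlt2 : t < ys.length := by omega
    rw [PySem.List.pyRange_one_cons (by exact_mod_cast htlt), List.range'_succ]
    rw [List.foldl_cons]
    have hg1 : PySem.List.pyGetD xs (t:Int) 0 = xs[t] := by
      simp [PySem.List.pyGetD_natCast, List.getD_eq_getElem?_getD, List.getElem?_eq_getElem htlt]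
    have hg2 : PySem.List.pyGetD ys (t:Int) 0 = ys[t] := by
      simp [PySem.List.pyGetD_natCast, List.getD_eq_getElem?_getD, List.getElem?_eq_getElem htlt2]
    have hP : pvP (pvD xs ys) (t+1) = pvP (pvD xs ys) t + (xs[t] - ys[t]) :=
      pvP_step xs ys hlen t htlt
    have hcond : ((s1 + xs[t]) == (s2 + ys[t]))
        = (pvP (pvD xs ys) (t+1) == pvP (pvD xs ys) i) := by
      rw [Bool.eq_iff_iff]
      simp only [beq_iff_eq]
      omega
    have hcast : (t:Int) + 1 = ((t+1 : Nat) : Int) := by push_cast; ring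
    by_cases hc : pvP (pvD xs ys) (t+1) = pvP (pvD xs ys) i
    · have hstep : pvAstep xs ys (i:Int) (s1, s2, m) (t:Int)
          = (s1 + xs[t], s2 + ys[t], max m ((t:Int) - (i:Int) + 1)) := by
        simp only [pvAstep, hg1, hg2, hcond]
        simp only [if_pos (beq_iff_eq.mpr hc)]
        have : (if (t:Int) - (i:Int) + 1 > m then (t:Int) - (i:Int) + 1 else m)
            = max m ((t:Int) - (i:Int) + 1) := by
          split <;> omega
        split
        · rename_i hgt
          simp [max_eq_right (by omega : m ≤ (t:Int) - (i:Int) + 1)]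
        · rename_i hgt
          simp [max_eq_left (by omega : (t:Int) - (i:Int) + 1 ≤ m)]
      rw [hstep]
      rw [List.filter_cons_of_pos (by simpa [beq_iff_eq] using hc), List.map_cons, List.foldl_cons]
      rw [hcast]
      exact ih (t+1) (by omega) (by omega) (by omega) _ _ _ (by omega)
    · have hstep : pvAstep xs ys (i:Int) (s1, s2, m) (t:Int)
          = (s1 + xs[t], s2 + ys[t], m) := by
        simp only [pvAstep, hg1, hg2, hcond]
        simp [hc]
      rw [hstep]
      rw [List.filter_cons_of_neg (by simpa [beq_iff_eq] using hc)]
      rw [hcast]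
      exact ih (t+1) (by omega) (by omega) (by omega) _ _ _ (by omega)

-- outer fold of running maxima = one max-fold over the concatenation
theorem pvFoldFlat (C : Nat → List Int) (l : List Nat) (a : Int) :
    l.foldl (fun m i => List.foldl max m (C i)) a = List.foldl max a (l.flatMap C) := by
  induction l generalizing a with
  | nil => rfl
  | cons x l ih => simp [List.flatMap_cons, List.foldl_append, ih]

theorem pvA_eq (xs ys : List Int) (hlen : xs.length ≤ ys.length) :
    longestCommonSum xs ys = List.foldl max 0 (pvLA (pvD xs ys) xs.length) := by
  unfold longestCommonSum pvLA
  simp only [PySem.List.len_eq]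
  rw [PySem.List.pyRange_zero_nat, List.foldl_map]
  rw [PySem.List.foldl_congr_mem _ _
    (fun m i => List.foldl max m
      (((List.range' i (xs.length - i)).filter
          (fun j => pvP (pvD xs ys) (j+1) == pvP (pvD xs ys) i)).map
        (fun j : Nat => ((j:Int) - (i:Int) + 1)))) 0
    (fun acc i hi => by
      have hin : i < xs.length := List.mem_range.mp hi
      exact pvInnerA xs ys hlen i (xs.length - i) i rfl (le_refl i) (by omega) 0 0 acc
        (by simp))]
  exact pvFoldFlat _ _ 0

-- facts about the first-occurrence index pvF
theorem pvF_le_and_eq (d : List Int) (t : Nat) (v : Int) (k : Nat)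
    (h : pvF d t v = some k) : pvP d k = v ∧ k ≤ t := by
  constructor
  · have := List.find?_some h
    simpa [beq_iff_eq] using this
  · have := List.mem_of_find?_eq_some h
    have := List.mem_range.mp this
    omega

theorem pvF_succ (d : List Int) (t : Nat) (v : Int) :
    pvF d (t+1) v = (pvF d t v).or (if pvP d (t+1) == v then some (t+1) else none) := by
  unfold pvF
  rw [List.range_succ, List.find?_append]
  congr 1
  by_cases hb : pvP d (t+1) = v
  · simp [hb]
  · simp [hb]

theorem pvF_isSome_le (d : List Int) (v : Int) :
    ∀ (t i : Nat), i ≤ t → pvP d i = v → ∃ k, pvF d t v = some k ∧ k ≤ i := by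
  intro t
  induction t with
  | zero =>
    intro i hi hp
    have h0 : i = 0 := by omega
    subst h0
    refine ⟨0, ?_, le_refl 0⟩
    unfold pvF
    simp [List.range_succ, hp]
  | succ t ih =>
    intro i hi hp
    by_cases hit : i ≤ t
    · obtain ⟨k, hk, hki⟩ := ih i hit hp
      exact ⟨k, by rw [pvF_succ, hk]; rfl, hki⟩
    · have hi' : i = t+1 := by omega
      cases hF : pvF d t v with
      | some k =>
        refine ⟨k, by rw [pvF_succ, hF]; rfl, ?_⟩
        have := (pvF_le_and_eq d t v k hF).2
        omega
      | none =>
        refine ⟨t+1, ?_, by omega⟩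
        rw [pvF_succ, hF]
        subst hi'
        simp [hp]

-- B's loop: dict invariant and running max over first-occurrence candidates
theorem pvInnerB (xs ys : List Int) (hlen : xs.length ≤ ys.length) :
    ∀ (k t : Nat), xs.length - t = k → t ≤ xs.length →
    ∀ (dct : PySem.Dict Int Int) (m : Int),
      (∀ v, dct.get? v = (pvF (pvD xs ys) t v).map (fun a : Nat => ((a:Int) - 1))) →
      ((PySem.List.pyRange (t:Int) (xs.length:Int) 1).foldl (pvBstep xs ys)
          (dct, pvP (pvD xs ys) t, m)).2.2
        = List.foldl max m ((List.range' t k).flatMap (pvCand (pvD xs ys))) := by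
  intro k
  induction k with
  | zero =>
    intro t hk htn dct m hd
    have ht : t = xs.length := by omega
    subst ht
    rw [PySem.List.pyRange_one_eq_nil (le_refl _)]
    simp
  | succ k ih =>
    intro t hk htn dct m hd
    have htlt : t < xs.length := by omega
    have htlt2 : t < ys.length := by omega
    rw [PySem.List.pyRange_one_cons (by exact_mod_cast htlt), List.range'_succ,
      List.flatMap_cons, List.foldl_cons]
    have hg1 : PySem.List.pyGetD xs (t:Int) 0 = xs[t] := by
      simp [PySem.List.pyGetD_natCast, List.getD_eq_getElem?_getD, List.getElem?_eq_getElem htlt]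
    have hg2 : PySem.List.pyGetD ys (t:Int) 0 = ys[t] := by
      simp [PySem.List.pyGetD_natCast, List.getD_eq_getElem?_getD, List.getElem?_eq_getElem htlt2]
    have hP : pvP (pvD xs ys) t + xs[t] - ys[t] = pvP (pvD xs ys) (t+1) := by
      rw [pvP_step xs ys hlen t htlt]; ring
    have hcast : (t:Int) + 1 = ((t+1 : Nat) : Int) := by push_cast; ring
    cases hF : pvF (pvD xs ys) t (pvP (pvD xs ys) (t+1)) with
    | some a =>
      have hstep : pvBstep xs ys (dct, pvP (pvD xs ys) t, m) (t:Int)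
          = (dct, pvP (pvD xs ys) (t+1), max m ((t:Int) + 1 - (a:Int))) := by
        simp only [pvBstep, hg1, hg2, hP, hd _, hF, Option.map_some]
        have : (t:Int) - ((a:Int) - 1) = (t:Int) + 1 - (a:Int) := by ring
        rw [this]
        split
        · rename_i hgt
          simp [max_eq_right (by omega : m ≤ (t:Int) + 1 - (a:Int))]
        · rename_i hgt
          simp [max_eq_left (by omega : (t:Int) + 1 - (a:Int) ≤ m)]
      rw [hstep]
      have hcand : pvCand (pvD xs ys) t = [(t:Int) + 1 - (a:Int)] := by
        unfold pvCand; rw [hF]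
      rw [hcand, List.singleton_append, List.foldl_cons, hcast]
      refine ih (t+1) (by omega) (by omega) dct _ ?_
      intro v
      rw [hd v, pvF_succ]
      cases hFv : pvF (pvD xs ys) t v with
      | some b => rfl
      | none =>
        have hne : pvP (pvD xs ys) (t+1) ≠ v := by
          intro he; rw [he] at hF; rw [hF] at hFv; exact Option.some_ne_none a hFv
        simp [hne]
    | none =>
      have hstep : pvBstep xs ys (dct, pvP (pvD xs ys) t, m) (t:Int)
          = (dct.insert (pvP (pvD xs ys) (t+1)) (t:Int), pvP (pvD xs ys) (t+1), m) := by
        simp only [pvBstep, hg1, hg2, hP, hd _, hF, Option.map_none]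
      rw [hstep]
      have hcand : pvCand (pvD xs ys) t = [] := by
        unfold pvCand; rw [hF]
      rw [hcand, List.nil_append, hcast]
      refine ih (t+1) (by omega) (by omega) _ m ?_
      intro v
      rw [PySem.Dict.get?_insert, pvF_succ]
      by_cases hv : v = pvP (pvD xs ys) (t+1)
      · rw [if_pos hv, hv, hF]
        simp
      · rw [if_neg hv, hd v]
        cases hFv : pvF (pvD xs ys) t v with
        | some b => rfl
        | none =>
          have : (pvP (pvD xs ys) (t+1) == v) = false := by
            simp [Ne.symm hv]
          simp [this]

theorem pvB_eq (xs ys : List Int) (hlen : xs.length ≤ ys.length) :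
    longestCommonSum_alt xs ys
      = List.foldl max 0 ((List.range' 0 xs.length).flatMap (pvCand (pvD xs ys))) := by
  unfold longestCommonSum_alt
  simp only [PySem.List.len_eq]
  have h0 : ∀ v, ((PySem.Dict.empty : PySem.Dict Int Int).insert 0 (-1)).get? v
      = (pvF (pvD xs ys) 0 v).map (fun a : Nat => ((a:Int) - 1)) := by
    intro v
    rw [PySem.Dict.get?_insert]
    unfold pvF
    by_cases hv : v = 0
    · subst hv
      simp [List.range_succ, pvP]
    · rw [if_neg hv]
      have : (pvP (pvD xs ys) 0 == v) = false := by
        simp [pvP_zero]; exact fun h => hv h.symm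
      simp [List.range_succ, List.find?, this]
  have := pvInnerB xs ys hlen xs.length 0 (by omega) (by omega)
    ((PySem.Dict.empty : PySem.Dict Int Int).insert 0 (-1)) 0 h0
  simpa [pvP_zero] using this

-- ===== VERDICT (by name: the statement is the Claim_ definition above) =====
theorem longestCommonSum_spec : Claim_equal_longestCommonSum := by
  unfold Claim_equal_longestCommonSum
  intro xs ys _dom hpre
  unfold Spec_longestCommonSum
  unfold Pre_longestCommonSum at hpre
  rw [pvA_eq xs ys hpre, pvB_eq xs ys hpre]
  apply pvMaxfold_eq
  · intro x hx
    unfold pvLA at hx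
    simp only [List.mem_flatMap, List.mem_map, List.mem_filter, List.mem_range,
      List.mem_range'_1] at hx
    obtain ⟨i, hin, j, ⟨⟨hij, hjn⟩, hcond⟩, hxv⟩ := hx
    have hcond' : pvP (pvD xs ys) i = pvP (pvD xs ys) (j+1) := by
      have := beq_iff_eq.mp hcond; omega
    obtain ⟨a, hFa, hai⟩ := pvF_isSome_le (pvD xs ys) (pvP (pvD xs ys) (j+1)) j i (by omega) hcond'
    refine ⟨(j:Int) + 1 - (a:Int), ?_, ?_⟩
    · simp only [List.mem_flatMap, List.mem_range'_1]
      refine ⟨j, ⟨by omega, by omega⟩, ?_⟩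
      unfold pvCand
      rw [hFa]
      simp
    · have hac : (a:Int) ≤ (i:Int) := by exact_mod_cast hai
      omega
  · intro y hy
    simp only [List.mem_flatMap, List.mem_range'_1] at hy
    obtain ⟨j, ⟨hj0, hjn⟩, hyc⟩ := hy
    unfold pvCand at hyc
    cases hFa : pvF (pvD xs ys) j (pvP (pvD xs ys) (j+1)) with
    | none => rw [hFa] at hyc; simp at hyc
    | some a =>
      rw [hFa] at hyc
      simp only [List.mem_singleton] at hyc
      obtain ⟨hPa, haj⟩ := pvF_le_and_eq (pvD xs ys) j _ a hFa
      refine ⟨y, ?_, le_refl _⟩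
      unfold pvLA
      simp only [List.mem_flatMap, List.mem_map, List.mem_filter, List.mem_range,
        List.mem_range'_1]
      refine ⟨a, by omega, j, ⟨⟨haj, by omega⟩, by simp [hPa]⟩, by omega⟩
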